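-- pv_equiv track=rewrite | github.com/bihealth/svirlpool | src/svirlpool/util/util.py | rolling_hashes
-- ===== SOURCE A (Python) =====
-- def get_hash_of_kmer(kmer: str, letter_dict: dict) -> int:
--     if not kmer or len(kmer) == 0:
--         raise ValueError("kmer must not be empty")
--     n_letters = len(letter_dict)
--     k = len(kmer)
--     hash_a = sum(
--         letter_dict.get(kmer[i], len(letter_dict)) * n_letters ** (k - i - 1)
--         for i in range(k)
--     )
--     # kmer_rc = str(Seq(kmer).reverse_complement())
--     # hash_b = sum([letter_dict.get(kmer_rc[i],len(letter_dict)) * n_letters**(k-i-1) for i in range(k)])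
--     return hash_a  # min(hash_a,hash_b)
--
-- def rolling_hashes(string: str, letter_dict: dict, k: int) -> list[int]:
--     if len(string) < k:
--         return []
--     hashes = [0] * (len(string) - k + 1)
--     hashes[0] = get_hash_of_kmer(string[:k], letter_dict)
--     first_hash = letter_dict.get(string[0], len(letter_dict))
--     N = len(letter_dict)
--     # now roll over all letters and always subtract the hash of the first letter (first_hash)
--     # and add the hash of the next letter (letter_dict[string[i+k]])
--     # to get the new hash value for the next position
--     for i in range(1, len(string) - k + 1):
--         hashes[i] = int(
--             (hashes[i - 1] - first_hash * N ** (k - 1)) * N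
--             + letter_dict.get(string[i + k - 1], len(letter_dict))
--         )
--         first_hash = letter_dict.get(string[i], len(letter_dict))
--     return hashes
-- ===== SOURCE B (Python) =====
-- def get_hash_of_kmer(kmer: str, letter_dict: dict) -> int:
--     if not kmer:
--         raise ValueError("kmer must not be empty")
--     n = len(letter_dict)
--     h = 0
--     for ch in kmer:
--         h = h * n + letter_dict.get(ch, n)
--     return h
--
-- def rolling_hashes(string: str, letter_dict: dict, k: int) -> list[int]:
--     if len(string) < k:
--         return []
--     return [get_hash_of_kmer(string[i:i + k], letter_dict)
--             for i in range(len(string) - k + 1)]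
-- ===== Notes on version B (the rewrite author's own statement) =====
-- stated objective: simpler
-- what changed: B drops A's rolling subtract-shift-add recurrence and carried state (first_hash, previous hash) entirely and computes each window's hash independently as a Horner evaluation of the k-mer slice.
import Mathlib
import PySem

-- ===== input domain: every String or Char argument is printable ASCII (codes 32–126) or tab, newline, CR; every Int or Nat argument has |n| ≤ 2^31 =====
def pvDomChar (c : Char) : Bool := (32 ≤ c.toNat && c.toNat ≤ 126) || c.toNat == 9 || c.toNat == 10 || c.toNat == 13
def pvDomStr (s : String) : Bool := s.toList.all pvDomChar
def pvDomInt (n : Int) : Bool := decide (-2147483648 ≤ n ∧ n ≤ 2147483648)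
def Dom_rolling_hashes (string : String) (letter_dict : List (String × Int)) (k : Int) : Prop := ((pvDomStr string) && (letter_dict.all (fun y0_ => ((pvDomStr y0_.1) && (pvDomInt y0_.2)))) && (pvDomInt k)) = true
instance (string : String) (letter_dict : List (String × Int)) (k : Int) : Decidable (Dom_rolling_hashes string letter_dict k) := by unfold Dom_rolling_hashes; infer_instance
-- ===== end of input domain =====

-- B replaces A's rolling subtract-shift-add recurrence by an independent Horner hash of each
-- window (simpler: no carried state); equivalence of return values is proved for k ≥ 1.

-- ===== PORT A =====

-- letter_dict.get(key, dflt): first-match lookup in the association list (exact for a Python dict)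
def pyDictGetD (d : List (String × Int)) (key : String) (dflt : Int) : Int :=
  match d.find? (fun p => p.1 == key) with
  | some p => p.2
  | none => dflt

-- sum(letter_dict.get(kmer[i], len) * n_letters ** (k-i-1) for i in range(k)); the empty-kmer
-- ValueError branch is unreachable under Pre_ (k ≥ 1 and len(string) ≥ k make every kmer nonempty)
def get_hash_of_kmer (kmer : List Char) (letter_dict : List (String × Int)) : Int :=
  let n_letters : Int := letter_dict.length
  let kk := kmer.length
  ((List.range kk).map (fun i =>
      pyDictGetD letter_dict (String.ofList [kmer.getD i ' ']) n_letters * n_letters ^ (kk - i - 1))).sum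

-- hashes[0] = hash of string[:k]; then the loop rolls, carrying (hashes so far reversed, first_hash).
-- N ** (k - 1) is ported as N ^ (k-1).toNat — exact under Pre_ (k ≥ 1); indexing string[i], string[i+k-1]
-- via pyGetD — in range under Pre_ for every i of the loop.
def rolling_hashes (string : String) (letter_dict : List (String × Int)) (k : Int) : List Int :=
  let s := string.toList
  if (s.length : Int) < k then []
  else
    let h0 := get_hash_of_kmer (PySem.List.slice s none (some k)) letter_dict
    let N : Int := letter_dict.length
    let fh0 := pyDictGetD letter_dict (String.ofList [PySem.List.pyGetD s 0 ' ']) N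
    let st := (PySem.List.pyRange 1 ((s.length : Int) - k + 1) 1).foldl
      (fun (st : List Int × Int) i =>
        (((st.1.headD 0 - st.2 * N ^ (k - 1).toNat) * N
            + pyDictGetD letter_dict (String.ofList [PySem.List.pyGetD s (i + k - 1) ' ']) N) :: st.1,
         pyDictGetD letter_dict (String.ofList [PySem.List.pyGetD s i ' ']) N))
      ([h0], fh0)
    st.1.reverse

-- ===== PORT B =====

-- Horner evaluation: h = h * n + letter_dict.get(ch, n) over the characters of the kmer
def get_hash_of_kmer_alt (kmer : List Char) (letter_dict : List (String × Int)) : Int :=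
  let n : Int := letter_dict.length
  kmer.foldl (fun h c => h * n + pyDictGetD letter_dict (String.ofList [c]) n) 0

-- [get_hash_of_kmer(string[i:i+k], letter_dict) for i in range(len(string)-k+1)]
def rolling_hashes_alt (string : String) (letter_dict : List (String × Int)) (k : Int) : List Int :=
  let s := string.toList
  if (s.length : Int) < k then []
  else (PySem.List.pyRange 0 ((s.length : Int) - k + 1) 1).map
    (fun i => get_hash_of_kmer_alt (PySem.List.slice s (some i) (some (i + k))) letter_dict)

-- ===== PRECONDITION & SPEC =====
-- Python A raises on every k ≤ 0 (ValueError from the empty first k-mer when k = 0 or len(string) ≤ -k,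
-- else IndexError from first_hash = letter_dict.get(string[i], ...) once i reaches len(string)); B's
-- per-window get_hash_of_kmer raises ValueError on those inputs too. For k ≥ 1 A always returns.
def Pre_rolling_hashes (string : String) (letter_dict : List (String × Int)) (k : Int) : Prop := 1 ≤ k
instance (string : String) (letter_dict : List (String × Int)) (k : Int) : Decidable (Pre_rolling_hashes string letter_dict k) := by unfold Pre_rolling_hashes; infer_instance

def pvWitness_rolling_hashes : String × (List (String × Int)) × Int := ("abca", [("a", 0), ("b", 1)], 2)

def Spec_rolling_hashes (string : String) (letter_dict : List (String × Int)) (k : Int) (out : List Int) : Prop := out = rolling_hashes_alt string letter_dict k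
instance (string : String) (letter_dict : List (String × Int)) (k : Int) (out : List Int) : Decidable (Spec_rolling_hashes string letter_dict k out) := by unfold Spec_rolling_hashes; infer_instance

-- ===== CLAIM (what is proved, stated in full; the proofs are below) =====
def Claim_equal_rolling_hashes : Prop := ∀ (string : String) (letter_dict : List (String × Int)) (k : Int), Dom_rolling_hashes string letter_dict k → Pre_rolling_hashes string letter_dict k → Spec_rolling_hashes string letter_dict k (rolling_hashes string letter_dict k)

-- ===== LEMMAS AND PROOFS =====

-- Horner fold from a nonzero seed: the seed contributes seed * N^len
theorem horner_from (letter_dict : List (String × Int)) (xs : List Char) :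
    ∀ h : Int, xs.foldl (fun h c => h * (letter_dict.length : Int) + pyDictGetD letter_dict (String.ofList [c]) letter_dict.length) h
      = h * (letter_dict.length : Int) ^ xs.length
        + xs.foldl (fun h c => h * (letter_dict.length : Int) + pyDictGetD letter_dict (String.ofList [c]) letter_dict.length) 0 := by
  induction xs with
  | nil => intro h; simp
  | cons c t ih =>
    intro h
    simp only [List.foldl_cons, List.length_cons]
    rw [ih (h * _ + _), ih (0 * _ + _)]
    ring

-- A's power-sum formula equals B's Horner evaluation on every kmer
theorem sum_eq_horner (letter_dict : List (String × Int)) (xs : List Char) :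
    get_hash_of_kmer xs letter_dict = get_hash_of_kmer_alt xs letter_dict := by
  induction xs with
  | nil => simp [get_hash_of_kmer, get_hash_of_kmer_alt]
  | cons c t ih =>
    simp only [get_hash_of_kmer, get_hash_of_kmer_alt, List.length_cons] at *
    rw [List.range_succ_eq_map]
    simp only [List.map_cons, List.map_map, List.sum_cons,
      List.getD_cons_zero, Function.comp_def, List.getD_cons_succ]
    have hmap : (List.map (fun x => pyDictGetD letter_dict (String.ofList [t.getD x ' ']) (letter_dict.length : Int) * (letter_dict.length : Int) ^ (t.length + 1 - (x + 1) - 1)) (List.range t.length))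
        = List.map (fun x => pyDictGetD letter_dict (String.ofList [t.getD x ' ']) (letter_dict.length : Int) * (letter_dict.length : Int) ^ (t.length - x - 1)) (List.range t.length) := by
      apply List.map_congr_left; intro x _
      have hx : t.length + 1 - (x + 1) - 1 = t.length - x - 1 := by omega
      rw [hx]
    have he0 : t.length + 1 - 0 - 1 = t.length := by omega
    rw [he0, hmap, ih, List.foldl_cons,
      horner_from letter_dict t (0 * (letter_dict.length : Int) + pyDictGetD letter_dict (String.ofList [c]) (letter_dict.length : Int))]
    ring

-- abbreviation used only by the proofs: hash of the window starting at j
def winH (s : List Char) (letter_dict : List (String × Int)) (kn j : Nat) : Int :=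
  get_hash_of_kmer_alt ((s.drop j).take kn) letter_dict

-- the rolling step: next window hash from the previous one
theorem roll_step (s : List Char) (letter_dict : List (String × Int)) (kn j : Nat)
    (hk : 1 ≤ kn) (hj : j + 1 + kn ≤ s.length) :
    winH s letter_dict kn (j + 1)
      = (winH s letter_dict kn j
          - pyDictGetD letter_dict (String.ofList [s.getD j ' ']) letter_dict.length * (letter_dict.length : Int) ^ (kn - 1)) * (letter_dict.length : Int)
        + pyDictGetD letter_dict (String.ofList [s.getD (j + kn) ' ']) letter_dict.length := by
  have hjlen : j < s.length := by omega
  have hdrop : s.drop j = s[j] :: s.drop (j + 1) := List.drop_eq_getElem_cons hjlen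
  have hk1 : kn = (kn - 1) + 1 := by omega
  have hmidlen : ((s.drop (j + 1)).take (kn - 1)).length = kn - 1 := by
    simp; omega
  have hidx : kn - 1 < (s.drop (j + 1)).length := by simp; omega
  -- window j = s[j] :: mid
  have hwj : (s.drop j).take kn = s[j] :: (s.drop (j + 1)).take (kn - 1) := by
    rw [hdrop]
    conv_lhs => rw [hk1]
    rw [List.take_succ_cons]
  -- window (j+1) = mid ++ [s[j+kn]]
  have hwj1 : (s.drop (j + 1)).take kn = (s.drop (j + 1)).take (kn - 1) ++ [s[j + kn]] := by
    conv_lhs => rw [hk1]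
    rw [List.take_succ, List.getElem?_eq_getElem hidx]
    congr 2
    simp [List.getElem_drop]
    congr 1
    omega
  have hget : s.getD j ' ' = s[j] := List.getD_eq_getElem s ' ' hjlen
  have hget2 : s.getD (j + kn) ' ' = s[j + kn] := List.getD_eq_getElem s ' ' (by omega)
  simp only [winH, get_hash_of_kmer_alt, hwj, hwj1, hget, hget2,
    List.foldl_append, List.foldl_cons, List.foldl_nil, zero_mul, zero_add]
  rw [horner_from letter_dict _ (pyDictGetD letter_dict (String.ofList [s[j]]) letter_dict.length), hmidlen]
  ring

-- the loop invariant of A's fold: after the iterations i = 1 … m the state is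
-- (reversed list of window hashes 0 … m, first_hash = d(string[m]))
theorem loop_inv (s : List Char) (letter_dict : List (String × Int)) (k : Int) (kn : Nat)
    (hkk : (kn : Int) = k) (hk : 1 ≤ kn) :
    ∀ m : Nat, m + kn ≤ s.length →
      (PySem.List.pyRange 1 ((m : Int) + 1) 1).foldl
        (fun (st : List Int × Int) i =>
          (((st.1.headD 0 - st.2 * (letter_dict.length : Int) ^ (k - 1).toNat) * (letter_dict.length : Int)
              + pyDictGetD letter_dict (String.ofList [PySem.List.pyGetD s (i + k - 1) ' ']) letter_dict.length) :: st.1,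
           pyDictGetD letter_dict (String.ofList [PySem.List.pyGetD s i ' ']) letter_dict.length))
        ([winH s letter_dict kn 0], pyDictGetD letter_dict (String.ofList [PySem.List.pyGetD s 0 ' ']) letter_dict.length)
      = (((List.range (m + 1)).map (winH s letter_dict kn)).reverse,
         pyDictGetD letter_dict (String.ofList [s.getD m ' ']) letter_dict.length) := by
  intro m
  induction m with
  | zero =>
    intro _
    have h0 : ((0 : Nat) : Int) + 1 ≤ 1 := by norm_num
    rw [PySem.List.pyRange_one_eq_nil h0]
    simp [PySem.List.pyGetD_zero, List.getD]
  | succ m ih =>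
    intro hm
    have hstep : PySem.List.pyRange 1 (((m + 1 : Nat) : Int) + 1) 1
        = PySem.List.pyRange 1 ((m : Int) + 1) 1 ++ [(m : Int) + 1] := by
      rw [show ((m + 1 : Nat) : Int) + 1 = ((m : Int) + 1) + 1 by push_cast; ring]
      exact PySem.List.pyRange_one_succ_right (by omega)
    rw [hstep, List.foldl_append, ih (by omega)]
    have hhd : (((List.range (m + 1)).map (winH s letter_dict kn)).reverse).headD 0
        = winH s letter_dict kn m := by
      rw [List.range_succ, List.map_append, List.reverse_append]
      simp
    have hi1 : PySem.List.pyGetD s ((m : Int) + 1) ' ' = s.getD (m + 1) ' ' := by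
      rw [show ((m : Int) + 1) = ((m + 1 : Nat) : Int) by push_cast; ring, PySem.List.pyGetD_natCast]
    have hi2 : PySem.List.pyGetD s ((m : Int) + 1 + k - 1) ' ' = s.getD (m + kn) ' ' := by
      rw [show ((m : Int) + 1 + k - 1) = ((m + kn : Nat) : Int) by push_cast; omega, PySem.List.pyGetD_natCast]
    have hexp : (k - 1).toNat = kn - 1 := by omega
    simp only [List.foldl_cons, List.foldl_nil, hhd, hi1, hi2, hexp, Prod.mk.injEq]
    refine ⟨?_, trivial⟩
    rw [← roll_step s letter_dict kn m hk (by omega)]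
    rw [List.range_succ (n := m + 1), List.map_append, List.reverse_append]
    simp

-- windows as B computes them: slice s [i : i+k] for i = 0 … len-k
theorem b_window (s : List Char) (k : Int) (kn j : Nat) (hkk : (kn : Int) = k) (hk : 1 ≤ kn) :
    PySem.List.slice s (some ((j : Nat) : Int)) (some (((j : Nat) : Int) + k)) = (s.drop j).take kn := by
  rw [PySem.List.slice_toNat s (by positivity) (by omega)]
  have h1 : (((j : Nat) : Int) + k).toNat - ((j : Nat) : Int).toNat = kn := by omega
  have h2 : (((j : Nat) : Int)).toNat = j := by omega
  rw [h1, h2]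

theorem rolling_hashes_eq (string : String) (letter_dict : List (String × Int)) (k : Int)
    (hk : 1 ≤ k) : rolling_hashes string letter_dict k = rolling_hashes_alt string letter_dict k := by
  unfold rolling_hashes rolling_hashes_alt
  set s := string.toList with hs
  by_cases hlen : (s.length : Int) < k
  · simp [hlen]
  · simp only [hlen, if_false]
    rw [not_lt] at hlen
    set kn := k.toNat with hkn
    have hkk : (kn : Int) = k := by omega
    have hk1 : 1 ≤ kn := by omega
    have hnk : kn ≤ s.length := by omega
    have hbound : ((s.length : Int) - k + 1) = ((s.length - kn : Nat) : Int) + 1 := by push_cast; omega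
    have hh0 : get_hash_of_kmer (PySem.List.slice s none (some k)) letter_dict
        = winH s letter_dict kn 0 := by
      rw [PySem.List.slice_to s (by omega), sum_eq_horner]
      simp [winH, hkn]
    rw [hbound, hh0, loop_inv s letter_dict k kn hkk hk1 (s.length - kn) (by omega)]
    simp only [List.reverse_reverse]
    rw [PySem.List.pyRange_one 0 (((s.length - kn : Nat) : Int) + 1)]
    have hW : ((((s.length - kn : Nat) : Int) + 1) - 0).toNat = s.length - kn + 1 := by omega
    rw [hW, List.map_map]
    apply List.map_congr_left
    intro j hj
    rw [List.mem_range] at hj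
    simp only [Function.comp_apply, zero_add]
    rw [b_window s k kn j hkk hk1]
    rfl

-- ===== VERDICT (by name: the statement is the Claim_ definition above) =====
theorem rolling_hashes_spec : Claim_equal_rolling_hashes := by
  intro string letter_dict k _ hk
  unfold Spec_rolling_hashes
  exact rolling_hashes_eq string letter_dict k hk
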